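-- pv_equiv track=rewrite | github.com/kimjune01/june.kim | worklog/temporal-spanner2.py | build_adj
-- ===== SOURCE A (Python) =====
-- from collections import defaultdict
--
-- def build_adj(n, timestamps):
--     adj = defaultdict(list)
--     for (u, v), t in timestamps.items():
--         adj[u].append((v, t, (u, v)))
--         adj[v].append((u, t, (u, v)))
--     for v in adj:
--         adj[v].sort(key=lambda x: x[1])
--     return adj
-- ===== SOURCE B (Python) =====
-- def _entries(k, items):
--     # all entries of vertex k, in global (stable) timestamp order
--     out = []
--     for (u, v), t in items:
--         if u == k:
--             out.append((v, t, (u, v)))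
--         if v == k:
--             out.append((u, t, (u, v)))
--     return out
--
-- def build_adj(n, timestamps):
--     # Sort the edges once, globally and stably, by timestamp; list vertices in
--     # first-appearance order; build each adjacency list by filtering that one
--     # sorted sequence, so there is no dict mutation and no per-vertex sort.
--     items = sorted(timestamps.items(), key=lambda kv: kv[1])
--     order = list(dict.fromkeys(x for uv in timestamps for x in uv))
--     return {k: _entries(k, items) for k in order}
-- ===== Notes on version B (the rewrite author's own statement) =====
-- stated objective: alternative
-- what changed: B sorts the edges once (stable, by timestamp), lists vertices in first-appearance order, and builds each adjacency list by filtering that one sorted sequence per vertex, replacing A's dict-mutating loop and per-vertex sorts.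
import Mathlib
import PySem

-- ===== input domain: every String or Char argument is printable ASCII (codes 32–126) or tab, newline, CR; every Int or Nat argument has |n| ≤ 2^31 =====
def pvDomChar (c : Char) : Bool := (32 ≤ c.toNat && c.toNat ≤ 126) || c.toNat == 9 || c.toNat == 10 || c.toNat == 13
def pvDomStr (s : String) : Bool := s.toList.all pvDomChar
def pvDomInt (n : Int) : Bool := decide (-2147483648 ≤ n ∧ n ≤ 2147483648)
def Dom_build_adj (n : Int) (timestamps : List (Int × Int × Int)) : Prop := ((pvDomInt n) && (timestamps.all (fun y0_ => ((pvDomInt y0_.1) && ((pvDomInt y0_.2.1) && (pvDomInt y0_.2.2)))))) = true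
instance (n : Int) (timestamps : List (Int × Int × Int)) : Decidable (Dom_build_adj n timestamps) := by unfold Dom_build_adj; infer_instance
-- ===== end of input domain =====

-- B replaces A's dict-mutating loop and per-vertex sorts by one global stable sort by timestamp
-- plus a filtering pass per vertex (vertices in first-appearance order); objective: alternative.
-- A returns a defaultdict, B a plain dict with the same items (equal as Python values).

-- ===== PORT A =====
-- the dict argument timestamps : {(u,v): t} arrives flattened as triples (u, v, t);
-- 'timestamps.items()' is the items of the corresponding PySem.Dict (duplicate keys collapse as in Python)
def pvItems (timestamps : List (Int × Int × Int)) : List ((Int × Int) × Int) :=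
  (PySem.Dict.ofList (timestamps.map (fun x => ((x.1, x.2.1), x.2.2)))).items

def build_adj (n : Int) (timestamps : List (Int × Int × Int)) : List (Int × List (Int × Int × (Int × Int))) :=
  let adj : PySem.Dict Int (List (Int × Int × (Int × Int))) :=
    (pvItems timestamps).foldl
      (fun d it =>
        (d.modify it.1.1 [] (· ++ [(it.1.2, it.2, (it.1.1, it.1.2))])).modify it.1.2 []
          (· ++ [(it.1.1, it.2, (it.1.1, it.1.2))]))
      PySem.Dict.empty
  -- 'for v in adj: adj[v].sort(key=lambda x: x[1])' — in-place sort of each value; exact as a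
  -- map over the items since the loop touches each (unique) key exactly once
  (PySem.Dict.mk (adj.items.map (fun p => (p.1, PySem.List.sorted p.2 (fun e => e.2.1) false)))).items

-- ===== PORT B =====
-- helper _entries(k, items): collect vertex k's entries by filtering the sorted edge sequence
def pvEntries (k : Int) (items : List ((Int × Int) × Int)) : List (Int × Int × (Int × Int)) :=
  items.foldl
    (fun out it =>
      let out := if it.1.1 = k then out ++ [(it.1.2, it.2, (it.1.1, it.1.2))] else out
      if it.1.2 = k then out ++ [(it.1.1, it.2, (it.1.1, it.1.2))] else out)
    []

def build_adj_alt (n : Int) (timestamps : List (Int × Int × Int)) : List (Int × List (Int × Int × (Int × Int))) :=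
  let its := pvItems timestamps
  let items := PySem.List.sorted its (fun kv => kv.2) false
  -- order = list(dict.fromkeys(x for uv in timestamps for x in uv)): first-occurrence dedup
  let order : PySem.Set Int := PySem.Set.ofList (its.flatMap (fun uv => [uv.1.1, uv.1.2]))
  order.map (fun k => (k, pvEntries k items))

-- ===== PRECONDITION & SPEC =====
def Spec_build_adj (n : Int) (timestamps : List (Int × Int × Int)) (out : List (Int × List (Int × Int × (Int × Int)))) : Prop := out = build_adj_alt n timestamps
instance (n : Int) (timestamps : List (Int × Int × Int)) (out : List (Int × List (Int × Int × (Int × Int)))) : Decidable (Spec_build_adj n timestamps out) := by unfold Spec_build_adj; infer_instance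

-- ===== CLAIM (what is proved, stated in full; the proofs are below) =====
def Claim_equal_build_adj : Prop := ∀ (n : Int) (timestamps : List (Int × Int × Int)), Dom_build_adj n timestamps → Spec_build_adj n timestamps (build_adj n timestamps)

-- ===== LEMMAS AND PROOFS =====

-- the two (vertex, entry) contributions of one dict item
def pvPairs (it : (Int × Int) × Int) : List (Int × (Int × Int × (Int × Int))) :=
  [(it.1.1, (it.1.2, it.2, (it.1.1, it.1.2))), (it.1.2, (it.1.1, it.2, (it.1.1, it.1.2)))]

-- vertex k's entries contributed by one item
def pvF (k : Int) (it : (Int × Int) × Int) : List (Int × Int × (Int × Int)) :=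
  ((pvPairs it).filter (fun p => p.1 == k)).map (·.2)

def pvVerts (l : List ((Int × Int) × Int)) : List Int := l.flatMap (fun it => [it.1.1, it.1.2])

-- B's helper is the flatMap of the per-item contributions
theorem pv_entries_flatMap (k : Int) (l : List ((Int × Int) × Int)) :
    pvEntries k l = l.flatMap (pvF k) := by
  suffices h : ∀ (l : List ((Int × Int) × Int)) (acc : List (Int × Int × (Int × Int))),
      l.foldl
        (fun out it =>
          let out := if it.1.1 = k then out ++ [(it.1.2, it.2, (it.1.1, it.1.2))] else out
          if it.1.2 = k then out ++ [(it.1.1, it.2, (it.1.1, it.1.2))] else out)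
        acc = acc ++ l.flatMap (pvF k) by
    simpa using h l []
  intro l
  induction l with
  | nil => intro acc; simp
  | cons x l ih =>
    intro acc
    simp only [List.foldl_cons, List.flatMap_cons, ih]
    have hx : (let out := if x.1.1 = k then acc ++ [(x.1.2, x.2, (x.1.1, x.1.2))] else acc
        if x.1.2 = k then out ++ [(x.1.1, x.2, (x.1.1, x.1.2))] else out) = acc ++ pvF k x := by
      simp only [pvF, pvPairs]
      by_cases h1 : x.1.1 = k <;> by_cases h2 : x.1.2 = k <;>
        simp [h1, h2, List.append_assoc]
    rw [hx, List.append_assoc]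

-- the double-modify loop body is the single-modify loop over pvPairs
theorem pv_foldl_double (l : List ((Int × Int) × Int)) (d : PySem.Dict Int (List (Int × Int × Int × Int))) :
    l.foldl
      (fun d it =>
        (d.modify it.1.1 [] (· ++ [(it.1.2, it.2, (it.1.1, it.1.2))])).modify it.1.2 []
          (· ++ [(it.1.1, it.2, (it.1.1, it.1.2))]))
      d
    = (l.flatMap pvPairs).foldl (fun d p => d.modify p.1 [] (· ++ [p.2])) d := by
  induction l generalizing d with
  | nil => rfl
  | cons x l ih => simp [pvPairs, List.foldl_cons, ih]

-- filter+map over the flattened pairs, per item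
theorem pv_filtermap_flatMap (k : Int) (l : List ((Int × Int) × Int)) :
    ((l.flatMap pvPairs).filter (fun p => p.1 == k)).map (·.2) = l.flatMap (pvF k) := by
  induction l with
  | nil => rfl
  | cons x l ih => simp [List.flatMap_cons, List.filter_append, List.map_append, ih, pvF]

theorem pv_keyF (k : Int) (it : (Int × Int) × Int) :
    ∀ e ∈ pvF k it, e.2.1 = it.2 := by
  intro e he
  simp only [pvF, pvPairs, List.mem_map, List.mem_filter] at he
  rcases he with ⟨p, ⟨hp, _⟩, rfl⟩
  simp at hp
  rcases hp with h | h <;> subst h <;> rfl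

theorem pv_map_fst_pairs (l : List ((Int × Int) × Int)) :
    (l.flatMap pvPairs).map (·.1) = pvVerts l := by
  induction l with
  | nil => rfl
  | cons x l ih => simp [pvPairs, pvVerts, List.flatMap_cons, ih]

-- ---- stable insertion sort commutes with a key-preserving flatMap ----

theorem pv_insertBy_append_left {β : Type} (b : β → β → Bool) (e : β) (u w : List β)
    (hu : ∀ a ∈ u, b e a = false) :
    PySem.List.insertBy b e (u ++ w) = u ++ PySem.List.insertBy b e w := by
  induction u with
  | nil => rfl
  | cons a u ih =>
    have ha := hu a (by simp)
    simp [PySem.List.insertBy, ha, ih (fun x hx => hu x (by simp [hx]))]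

theorem pv_insertBy_front {β : Type} (b : β → β → Bool) (e : β) (w : List β)
    (hw : ∀ a ∈ w, b e a = true) :
    PySem.List.insertBy b e w = e :: w := by
  cases w with
  | nil => rfl
  | cons a w => simp [PySem.List.insertBy, hw a (by simp)]

-- fold-inserting a constant-key block into u ++ w (u's keys ≤ k < w's keys) lands between them
theorem pv_foldl_ins_block {β : Type} (keyE : β → Int) (kk : Int) :
    ∀ (block u w : List β), (∀ e ∈ block, keyE e = kk) → (∀ a ∈ u, keyE a ≤ kk) →
      (∀ a ∈ w, kk < keyE a) →
      block.foldl (fun acc e => PySem.List.insertBy (fun a b => decide (keyE a < keyE b)) e acc) (u ++ w)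
        = u ++ block ++ w := by
  intro block
  induction block with
  | nil => intro u w _ _ _; simp
  | cons e blk ih =>
    intro u w hb hu hw
    have he : keyE e = kk := hb e (by simp)
    have h1 : PySem.List.insertBy (fun a b => decide (keyE a < keyE b)) e (u ++ w) = u ++ e :: w := by
      rw [pv_insertBy_append_left _ _ _ _ (fun a ha => by
        simp only [decide_eq_false_iff_not, not_lt]; rw [he]; exact hu a ha)]
      rw [pv_insertBy_front _ _ _ (fun a ha => by
        simp only [decide_eq_true_eq]; rw [he]; exact hw a ha)]
    have h2 := ih (u ++ [e]) w (fun x hx => hb x (by simp [hx]))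
      (fun a ha => by
        rcases List.mem_append.1 ha with h | h
        · exact hu a h
        · simp at h; subst h; exact le_of_eq he) hw
    simp only [List.foldl_cons, h1]
    have : u ++ e :: w = (u ++ [e]) ++ w := by simp
    rw [this, h2]; simp

-- fold-inserting a block whose keys all dominate u's keys skips u
theorem pv_foldl_ins_append_left {β : Type} (keyE : β → Int) :
    ∀ (block u w : List β), (∀ e ∈ block, ∀ a ∈ u, ¬ (keyE e < keyE a)) →
      block.foldl (fun acc e => PySem.List.insertBy (fun a b => decide (keyE a < keyE b)) e acc) (u ++ w)
        = u ++ block.foldl (fun acc e => PySem.List.insertBy (fun a b => decide (keyE a < keyE b)) e acc) w := by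
  intro block
  induction block with
  | nil => intro u w _; simp
  | cons e blk ih =>
    intro u w hb
    simp only [List.foldl_cons]
    rw [pv_insertBy_append_left _ _ _ _ (fun a ha => by
      simp only [decide_eq_false_iff_not]; exact hb e (by simp) a ha)]
    exact ih u _ (fun x hx a ha => hb x (by simp [hx]) a ha)

-- inserting one item's entries into the flattened image of a sorted list
theorem pv_step {α β : Type} (key : α → Int) (keyE : β → Int) (f : α → List β)
    (hf : ∀ x, ∀ e ∈ f x, keyE e = key x) (x : α) :
    ∀ (s : List α), s.Pairwise (fun a b => key a ≤ key b) →
      (f x).foldl (fun acc e => PySem.List.insertBy (fun a b => decide (keyE a < keyE b)) e acc)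
        (s.flatMap f)
      = (PySem.List.insertBy (fun a b => decide (key a < key b)) x s).flatMap f := by
  intro s
  induction s with
  | nil =>
    intro _
    have := pv_foldl_ins_block keyE (key x) (f x) [] [] (hf x) (by simp) (by simp)
    simpa [PySem.List.insertBy] using this
  | cons a s ih =>
    intro hp
    have hps : s.Pairwise (fun a b => key a ≤ key b) := hp.of_cons
    have has : ∀ b ∈ s, key a ≤ key b := by
      intro b hb; exact (List.pairwise_cons.1 hp).1 b hb
    by_cases hlt : key x < key a
    · have hw : ∀ e ∈ (a :: s).flatMap f, key x < keyE e := by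
        intro e he
        simp only [List.mem_flatMap] at he
        rcases he with ⟨y, hy, hey⟩
        rw [hf y e hey]
        rcases List.mem_cons.1 hy with rfl | hy'
        · exact hlt
        · exact lt_of_lt_of_le hlt (has y hy')
      have := pv_foldl_ins_block keyE (key x) (f x) [] ((a :: s).flatMap f) (hf x) (by simp) hw
      simp only [List.nil_append] at this
      rw [this]
      simp [PySem.List.insertBy, hlt, List.flatMap_cons]
    · have h1 := pv_foldl_ins_append_left keyE (f x) (f a) (s.flatMap f)
        (fun e he aa ha => by rw [hf x e he, hf a aa ha]; exact hlt)
      simp only [List.flatMap_cons]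
      rw [h1, ih hps]
      have : PySem.List.insertBy (fun a b => decide (key a < key b)) x (a :: s)
          = a :: PySem.List.insertBy (fun a b => decide (key a < key b)) x s := by
        simp [PySem.List.insertBy, hlt]
      rw [this, List.flatMap_cons]

-- insertBy into a key-sorted list stays key-sorted
theorem pv_pairwise_insertBy {α : Type} (key : α → Int) (x : α) :
    ∀ (s : List α), s.Pairwise (fun a b => key a ≤ key b) →
      (PySem.List.insertBy (fun a b => decide (key a < key b)) x s).Pairwise
        (fun a b => key a ≤ key b) := by
  intro s
  induction s with
  | nil => intro _; simp [PySem.List.insertBy]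
  | cons a s ih =>
    intro hp
    have has : ∀ b ∈ s, key a ≤ key b := (List.pairwise_cons.1 hp).1
    by_cases hlt : key x < key a
    · simp only [PySem.List.insertBy, hlt, decide_true, if_true]
      refine List.pairwise_cons.2 ⟨?_, hp⟩
      intro b hb
      rcases List.mem_cons.1 hb with rfl | hb'
      · exact le_of_lt hlt
      · exact le_of_lt (lt_of_lt_of_le hlt (has b hb'))
    · simp only [PySem.List.insertBy, hlt, decide_false]
      refine List.pairwise_cons.2 ⟨?_, ih hp.of_cons⟩
      intro b hb
      rcases (PySem.List.mem_insertBy _ _ _ _).1 hb with rfl | hb'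
      · exact le_of_not_gt hlt
      · exact has b hb'

-- MAIN: a stable sort commutes with a key-preserving flatMap
theorem pv_sorted_flatMap {α β : Type} (key : α → Int) (keyE : β → Int) (f : α → List β)
    (hf : ∀ x, ∀ e ∈ f x, keyE e = key x) (l : List α) :
    PySem.List.sorted (l.flatMap f) keyE false = (PySem.List.sorted l key false).flatMap f := by
  rw [PySem.List.sorted_eq_foldl_insertBy, PySem.List.sorted_eq_foldl_insertBy]
  suffices h : ∀ (l : List α) (s : List α), s.Pairwise (fun a b => key a ≤ key b) →
      (l.flatMap f).foldl (fun acc e => PySem.List.insertBy (fun a b => decide (keyE a < keyE b)) e acc)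
        (s.flatMap f)
      = (l.foldl (fun acc x => PySem.List.insertBy (fun a b => decide (key a < key b)) x acc) s).flatMap f by
    simpa using h l [] (by simp)
  intro l
  induction l with
  | nil => intro s _; simp
  | cons x l ih =>
    intro s hp
    simp only [List.flatMap_cons, List.foldl_append, List.foldl_cons]
    rw [pv_step key keyE f hf x s hp]
    exact ih _ (pv_pairwise_insertBy key x s hp)

-- A's result, characterised
theorem pv_A_items (n : Int) (timestamps : List (Int × Int × Int)) :
    build_adj n timestamps
      = (PySem.Set.ofList (pvVerts (pvItems timestamps))).map
          (fun k => (k, PySem.List.sorted ((pvItems timestamps).flatMap (pvF k)) (fun e => e.2.1) false)) := by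
  simp only [build_adj]
  rw [pv_foldl_double]
  set its := pvItems timestamps with hits
  have hkeys := PySem.Dict.keys_foldl_modify_key (its.flatMap pvPairs) (fun p => p.1) []
    (fun _ p => (· ++ [p.2])) PySem.Dict.empty
  have hnd : (PySem.Dict.empty : PySem.Dict Int (List (Int × Int × (Int × Int)))).keys.Nodup := by
    simp [PySem.Dict.keys_empty]
  have hnodup := PySem.Dict.nodup_keys_foldl_modify_key (its.flatMap pvPairs) (fun p => p.1) []
    (fun _ p => (· ++ [p.2])) PySem.Dict.empty hnd
  have hitems := PySem.Dict.items_eq_map_keys _ hnodup ([] : List (Int × Int × (Int × Int)))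
  rw [hitems, hkeys]
  have hemp : (PySem.Dict.empty : PySem.Dict Int (List (Int × Int × (Int × Int)))).keys = [] :=
    PySem.Dict.keys_empty
  rw [hemp, pv_map_fst_pairs, List.map_map]
  congr 1
  funext k
  have hgd := PySem.Dict.getD_foldl_modify_append (its.flatMap pvPairs)
    (PySem.Dict.empty : PySem.Dict Int (List (Int × Int × (Int × Int)))) k
  simp only [Function.comp_apply, hgd, PySem.Dict.getD_empty, List.nil_append,
    pv_filtermap_flatMap]

-- B's result, characterised
theorem pv_B_items (n : Int) (timestamps : List (Int × Int × Int)) :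
    build_adj_alt n timestamps
      = (PySem.Set.ofList (pvVerts (pvItems timestamps))).map
          (fun k => (k, (PySem.List.sorted (pvItems timestamps) (fun kv => kv.2) false).flatMap (pvF k))) := by
  simp only [build_adj_alt]
  congr 1
  funext k
  rw [pv_entries_flatMap]

-- ===== VERDICT (by name: the statement is the Claim_ definition above) =====
theorem build_adj_spec : Claim_equal_build_adj := by
  intro n timestamps _
  unfold Spec_build_adj
  rw [pv_A_items, pv_B_items]
  congr 1
  funext k
  congr 1
  exact pv_sorted_flatMap (fun kv => kv.2) (fun e => e.2.1) (pvF k) (fun x => pv_keyF k x) _
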